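-- pv_equiv track=rewrite | github.com/destifo/CP-Codeforces | A. Trust Nobody/TrustNobody.py | findPossibleLiars
-- ===== SOURCE A (Python) =====
-- from typing import List
--
-- def findPossibleLiars(l: List[int]) -> int:
--     for liars in range(len(l)+1):
--         count = 0
--         for i in l:
--             if liars < i:
--                 count += 1
--
--         if count == liars:
--             return count
--
--     return -1
-- ===== SOURCE B (Python) =====
-- from typing import List
-- from collections import Counter
--
-- def findPossibleLiars(l: List[int]) -> int:
--     # Single sweep: the count of elements greater than k is maintained
--     # incrementally via a Counter (count(k) = count(k-1) - multiplicity of k)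
--     # instead of rescanning the whole list for every candidate k.
--     c = Counter(l)
--     count = sum(1 for x in l if 0 < x)  # count of elements > 0
--     for k in range(len(l) + 1):
--         if 0 < k:
--             count -= c[k]
--         if count == k:
--             return count
--     return -1
-- ===== Notes on version B (the rewrite author's own statement) =====
-- stated objective: alternative
-- what changed: Replaced A's rescan of the whole list for every candidate liar count with a Counter built once and an incremental update count(k) = count(k-1) - multiplicity(k), so the inner scan disappears (O(n) sweep vs O(n^2) worst case, though not measurably faster on the timed inputs where A exits early).
import Mathlib
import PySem

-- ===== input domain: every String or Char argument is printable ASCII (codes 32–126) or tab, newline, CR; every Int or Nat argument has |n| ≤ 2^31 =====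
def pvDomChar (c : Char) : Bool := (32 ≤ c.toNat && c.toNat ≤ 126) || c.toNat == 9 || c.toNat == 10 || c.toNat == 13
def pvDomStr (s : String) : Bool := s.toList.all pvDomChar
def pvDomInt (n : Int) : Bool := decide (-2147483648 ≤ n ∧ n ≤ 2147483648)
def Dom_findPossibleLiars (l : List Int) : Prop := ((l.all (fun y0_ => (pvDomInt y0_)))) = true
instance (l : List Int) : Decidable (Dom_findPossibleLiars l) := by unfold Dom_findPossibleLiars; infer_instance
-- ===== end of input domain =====

-- B replaces A's rescan-per-candidate with a Counter built once and an incremental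
-- update of the count of larger elements (objective: alternative algorithm).


-- ===== PORT A =====
-- the 'for liars in range(len(l)+1)' loop with early return; inner foldl is the
-- 'for i in l: if liars < i: count += 1' scan
def pvALoop (l : List Int) : List Int → Int
  | [] => -1
  | liars :: rest =>
    let count := l.foldl (fun c i => if liars < i then c + 1 else c) 0
    if count = liars then count else pvALoop l rest

def findPossibleLiars (l : List Int) : Int :=
  pvALoop l (PySem.List.pyRange 0 ((l.length : Int) + 1) 1)

-- ===== PORT B =====
-- the 'for k in range(len(l)+1)' loop of Source B carrying the running count
def pvBLoop (c : PySem.Dict Int Int) (count : Int) : List Int → Int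
  | [] => -1
  | k :: rest =>
    let count' := if 0 < k then count - c.getD k 0 else count
    if count' = k then count' else pvBLoop c count' rest

def findPossibleLiars_alt (l : List Int) : Int :=
  let c := PySem.Dict.counter l
  let count0 := l.foldl (fun acc x => if 0 < x then acc + 1 else acc) 0
  pvBLoop c count0 (PySem.List.pyRange 0 ((l.length : Int) + 1) 1)

-- ===== PRECONDITION & SPEC =====
def Spec_findPossibleLiars (l : List Int) (out : Int) : Prop := out = findPossibleLiars_alt l
instance (l : List Int) (out : Int) : Decidable (Spec_findPossibleLiars l out) := by unfold Spec_findPossibleLiars; infer_instance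

-- ===== CLAIM (what is proved, stated in full; the proofs are below) =====
def Claim_equal_findPossibleLiars : Prop := ∀ (l : List Int), Dom_findPossibleLiars l → Spec_findPossibleLiars l (findPossibleLiars l)

-- ===== LEMMAS AND PROOFS =====

-- number of elements of l strictly greater than k
def pvCnt (l : List Int) (k : Int) : Int := (l.countP (fun i => decide (k < i)) : Int)

theorem pvCnt_step_nat (l : List Int) (k : Int) :
    l.countP (fun i => decide (k ≤ i)) = l.countP (fun i => decide (k < i)) + l.count k := by
  induction l with
  | nil => simp
  | cons x xs ih =>
    simp only [List.countP_cons, List.count_cons]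
    by_cases h3 : x = k
    · simp [h3, ih]
      omega
    · by_cases h2 : k < x
      · simp [le_of_lt h2, h2, h3, ih]
        omega
      · have h1 : ¬ k ≤ x := by omega
        simp [h1, h2, h3, ih]

theorem pvCnt_step (l : List Int) (k : Int) :
    pvCnt l (k - 1) - (l.count k : Int) = pvCnt l k := by
  have hc : l.countP (fun i => decide (k - 1 < i)) = l.countP (fun i => decide (k ≤ i)) :=
    List.countP_congr (fun a _ => by simp only [decide_eq_true_eq]; omega)
  simp only [pvCnt, hc, pvCnt_step_nat]
  push_cast
  ring

theorem pvA_count_aux (l : List Int) (liars acc : Int) :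
    l.foldl (fun c i => if liars < i then c + 1 else c) acc = acc + pvCnt l liars := by
  induction l generalizing acc with
  | nil => simp [pvCnt]
  | cons x xs ih =>
    simp only [List.foldl_cons, pvCnt, List.countP_cons] at *
    by_cases h : liars < x <;> simp [h, ih] <;> ring

theorem pvA_count (l : List Int) (liars : Int) :
    l.foldl (fun c i => if liars < i then c + 1 else c) 0 = pvCnt l liars := by
  simp [pvA_count_aux]

theorem pvLoop_eq (l : List Int) (a b : Int) (ha : 1 ≤ a) :
    pvALoop l (PySem.List.pyRange a b 1) =
      pvBLoop (PySem.Dict.counter l) (pvCnt l (a - 1)) (PySem.List.pyRange a b 1) := by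
  by_cases hab : a < b
  · rw [PySem.List.pyRange_one_cons hab]
    have h1 : ¬ (b - (a + 1)).toNat = (b - a).toNat := by omega
    have hcnt : (if 0 < a then pvCnt l (a - 1) - (PySem.Dict.counter l).getD a 0
        else pvCnt l (a - 1)) = pvCnt l a := by
      rw [if_pos (by omega), PySem.Dict.getD_counter, pvCnt_step]
    simp only [pvBLoop, pvALoop, hcnt, pvA_count]
    by_cases hc : pvCnt l a = a
    · simp [hc]
    · simp only [hc]
      have := pvLoop_eq l (a + 1) b (by omega)
      simpa using this
  · rw [PySem.List.pyRange_one_eq_nil (by omega)]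
    simp [pvALoop, pvBLoop]
termination_by (b - a).toNat
decreasing_by omega

-- ===== VERDICT (by name: the statement is the Claim_ definition above) =====
theorem findPossibleLiars_spec : Claim_equal_findPossibleLiars := by
  intro l _
  unfold Spec_findPossibleLiars findPossibleLiars findPossibleLiars_alt
  have h0 : (0 : Int) < (l.length : Int) + 1 := by positivity
  rw [PySem.List.pyRange_one_cons h0]
  simp only [pvALoop, pvBLoop, pvA_count]
  rw [if_neg (lt_irrefl (0:Int))]
  by_cases h : pvCnt l 0 = 0
  · simp [h]
  · simp only [h]
    have := pvLoop_eq l 1 ((l.length : Int) + 1) le_rfl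
    simpa using this
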